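-- pv_equiv track=rewrite | github.com/Ace1928/eidosian_forge | archive_forge/code/func_is_change_applicable_for_power_state.py | is_change_applicable_for_power_state
-- ===== SOURCE A (Python) =====
-- def is_change_applicable_for_power_state(current_power_state, apply_power_state):
--     """ checks if changes are applicable or not for current system state
--         :param current_power_state: Current power state
--         :type current_power_state: str
--         :param apply_power_state: Required power state
--         :type apply_power_state: str
--         :return: boolean True if changes is applicable
--     """
--     on_states = ['On', 'PoweringOn']
--     off_states = ['Off', 'PoweringOff']
--     reset_map_apply = {('On', 'ForceOn'): off_states, ('PushPowerButton',): on_states + off_states, ('ForceOff', 'ForceRestart', 'GracefulRestart', 'GracefulShutdown', 'Nmi', 'PowerCycle'): on_states}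
--     is_reset_applicable = False
--     for apply_states, applicable_states in reset_map_apply.items():
--         if apply_power_state in apply_states:
--             if current_power_state in applicable_states:
--                 is_reset_applicable = True
--                 break
--             break
--     return is_reset_applicable
-- ===== SOURCE B (Python) =====
-- def _request_direction(apply_power_state):
--     # +1: requests the system be on; -1: requests it be off/reset; 0: toggle; None: unrecognized
--     if apply_power_state in ('On', 'ForceOn'):
--         return 1
--     if apply_power_state == 'PushPowerButton':
--         return 0
--     if apply_power_state in ('ForceOff', 'ForceRestart', 'GracefulRestart',
--                              'GracefulShutdown', 'Nmi', 'PowerCycle'):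
--         return -1
--     return None
--
--
-- def _current_side(current_power_state):
--     # +1: currently on(ish); -1: currently off(ish); None: unknown state
--     if current_power_state in ('On', 'PoweringOn'):
--         return 1
--     if current_power_state in ('Off', 'PoweringOff'):
--         return -1
--     return None
--
--
-- def is_change_applicable_for_power_state(current_power_state, apply_power_state):
--     """ checks if changes are applicable or not for current system state """
--     d = _request_direction(apply_power_state)
--     s = _current_side(current_power_state)
--     return d is not None and s is not None and d != s
-- ===== Notes on version B (the rewrite author's own statement) =====
-- stated objective: alternative
-- what changed: Replaced the scan over tuple-keyed groups and membership in per-group applicable-state lists by a sign encoding: each apply state is classified to a direction (+1 on, -1 off/reset, 0 toggle), each current state to a side (+1/-1), and the change is applicable iff both are recognized and direction differs from side; the applicable-state lists disappear entirely.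
import Mathlib
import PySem

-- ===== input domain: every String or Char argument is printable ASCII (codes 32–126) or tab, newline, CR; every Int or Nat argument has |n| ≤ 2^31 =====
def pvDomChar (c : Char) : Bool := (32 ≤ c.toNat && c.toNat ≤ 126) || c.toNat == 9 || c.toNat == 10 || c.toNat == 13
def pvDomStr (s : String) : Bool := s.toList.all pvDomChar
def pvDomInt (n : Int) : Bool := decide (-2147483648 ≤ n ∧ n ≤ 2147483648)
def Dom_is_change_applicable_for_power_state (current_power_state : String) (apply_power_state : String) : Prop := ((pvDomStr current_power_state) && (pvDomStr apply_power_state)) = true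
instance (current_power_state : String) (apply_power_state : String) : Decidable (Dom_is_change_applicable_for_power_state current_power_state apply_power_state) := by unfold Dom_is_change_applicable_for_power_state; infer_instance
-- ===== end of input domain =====

-- B drops A's table of applicable-state lists: it classifies the apply state to a direction
-- (+1 on / -1 off-reset / 0 toggle) and the current state to a side (+1/-1) and compares them
-- (objective: alternative structure, same cost).

-- ===== PORT A =====
-- the for-loop with break: once apply_power_state is found in a group's key tuple, the loop ends
def pvALoop (current_power_state : String) (apply_power_state : String) : List (List String × List String) → Bool
  | [] => false
  | (apply_states, applicable_states) :: rest =>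
      if apply_states.contains apply_power_state then
        -- inner if sets the flag and breaks; otherwise breaks with flag still False
        applicable_states.contains current_power_state
      else pvALoop current_power_state apply_power_state rest

def is_change_applicable_for_power_state (current_power_state : String) (apply_power_state : String) : Bool :=
  let on_states := ["On", "PoweringOn"]
  let off_states := ["Off", "PoweringOff"]
  let reset_map_apply : List (List String × List String) :=
    [(["On", "ForceOn"], off_states),
     (["PushPowerButton"], on_states ++ off_states),
     (["ForceOff", "ForceRestart", "GracefulRestart", "GracefulShutdown", "Nmi", "PowerCycle"], on_states)]
  pvALoop current_power_state apply_power_state reset_map_apply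

-- ===== PORT B =====
-- +1: requests on; -1: requests off/reset; 0: toggle; none: unrecognized
def pvRequestDirection (apply_power_state : String) : Option Int :=
  if apply_power_state = "On" ∨ apply_power_state = "ForceOn" then some 1
  else if apply_power_state = "PushPowerButton" then some 0
  else if apply_power_state = "ForceOff" ∨ apply_power_state = "ForceRestart" ∨
          apply_power_state = "GracefulRestart" ∨ apply_power_state = "GracefulShutdown" ∨
          apply_power_state = "Nmi" ∨ apply_power_state = "PowerCycle" then some (-1)
  else none

-- +1: currently on(ish); -1: currently off(ish); none: unknown state
def pvCurrentSide (current_power_state : String) : Option Int :=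
  if current_power_state = "On" ∨ current_power_state = "PoweringOn" then some 1
  else if current_power_state = "Off" ∨ current_power_state = "PoweringOff" then some (-1)
  else none

def is_change_applicable_for_power_state_alt (current_power_state : String) (apply_power_state : String) : Bool :=
  match pvRequestDirection apply_power_state, pvCurrentSide current_power_state with
  | some d, some s => d ≠ s
  | _, _ => false

-- ===== PRECONDITION & SPEC =====
def Spec_is_change_applicable_for_power_state (current_power_state : String) (apply_power_state : String) (out : Bool) : Prop := out = is_change_applicable_for_power_state_alt current_power_state apply_power_state
instance (current_power_state : String) (apply_power_state : String) (out : Bool) : Decidable (Spec_is_change_applicable_for_power_state current_power_state apply_power_state out) := by unfold Spec_is_change_applicable_for_power_state; infer_instance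

-- ===== CLAIM (what is proved, stated in full; the proofs are below) =====
def Claim_equal_is_change_applicable_for_power_state : Prop := ∀ (current_power_state : String) (apply_power_state : String), Dom_is_change_applicable_for_power_state current_power_state apply_power_state → Spec_is_change_applicable_for_power_state current_power_state apply_power_state (is_change_applicable_for_power_state current_power_state apply_power_state)

-- ===== LEMMAS AND PROOFS =====

-- ===== VERDICT (by name: the statement is the Claim_ definition above) =====
theorem is_change_applicable_for_power_state_spec : Claim_equal_is_change_applicable_for_power_state := by
  intro cur app _
  unfold Spec_is_change_applicable_for_power_state
  unfold is_change_applicable_for_power_state is_change_applicable_for_power_state_alt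
  unfold pvRequestDirection pvCurrentSide
  by_cases a1 : app = "On"
  · subst a1
    by_cases c1 : cur = "On"
    all_goals by_cases c2 : cur = "PoweringOn"
    all_goals by_cases c3 : cur = "Off"
    all_goals by_cases c4 : cur = "PoweringOff"
    all_goals simp_all [pvALoop]
  by_cases a2 : app = "ForceOn"
  · subst a2
    by_cases c1 : cur = "On"
    all_goals by_cases c2 : cur = "PoweringOn"
    all_goals by_cases c3 : cur = "Off"
    all_goals by_cases c4 : cur = "PoweringOff"
    all_goals simp_all [pvALoop]
  by_cases a3 : app = "PushPowerButton"
  · subst a3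
    by_cases c1 : cur = "On"
    all_goals by_cases c2 : cur = "PoweringOn"
    all_goals by_cases c3 : cur = "Off"
    all_goals by_cases c4 : cur = "PoweringOff"
    all_goals simp_all [pvALoop]
  by_cases a4 : app = "ForceOff"
  · subst a4
    by_cases c1 : cur = "On"
    all_goals by_cases c2 : cur = "PoweringOn"
    all_goals by_cases c3 : cur = "Off"
    all_goals by_cases c4 : cur = "PoweringOff"
    all_goals simp_all [pvALoop]
  by_cases a5 : app = "ForceRestart"
  · subst a5
    by_cases c1 : cur = "On"
    all_goals by_cases c2 : cur = "PoweringOn"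
    all_goals by_cases c3 : cur = "Off"
    all_goals by_cases c4 : cur = "PoweringOff"
    all_goals simp_all [pvALoop]
  by_cases a6 : app = "GracefulRestart"
  · subst a6
    by_cases c1 : cur = "On"
    all_goals by_cases c2 : cur = "PoweringOn"
    all_goals by_cases c3 : cur = "Off"
    all_goals by_cases c4 : cur = "PoweringOff"
    all_goals simp_all [pvALoop]
  by_cases a7 : app = "GracefulShutdown"
  · subst a7
    by_cases c1 : cur = "On"
    all_goals by_cases c2 : cur = "PoweringOn"
    all_goals by_cases c3 : cur = "Off"
    all_goals by_cases c4 : cur = "PoweringOff"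
    all_goals simp_all [pvALoop]
  by_cases a8 : app = "Nmi"
  · subst a8
    by_cases c1 : cur = "On"
    all_goals by_cases c2 : cur = "PoweringOn"
    all_goals by_cases c3 : cur = "Off"
    all_goals by_cases c4 : cur = "PoweringOff"
    all_goals simp_all [pvALoop]
  by_cases a9 : app = "PowerCycle"
  · subst a9
    by_cases c1 : cur = "On"
    all_goals by_cases c2 : cur = "PoweringOn"
    all_goals by_cases c3 : cur = "Off"
    all_goals by_cases c4 : cur = "PoweringOff"
    all_goals simp_all [pvALoop]
  simp [pvALoop, a1, a2, a3, a4, a5, a6, a7, a8, a9]
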